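-- pv_equiv track=rewrite | github.com/liangminghuii/An-Expert-Model-Based-on-a-THIQAs-Literature-Knowledge-Base-and-RAG-Technology | 05/cls_analysis.py | get_taxonomic_ranks
-- ===== SOURCE A (Python) =====
-- def get_taxonomic_ranks(taxid, parent_map, rank_map, taxid_to_name):
--     """获取物种的六级分类信息"""
--     target_ranks = {
--         'kingdom': '',
--         'phylum': '',
--         'class': '',
--         'order': '',
--         'family': '',
--         'genus': ''
--     }
--
--     # 向上回溯谱系
--     current_taxid = taxid
--     while current_taxid != '1' and current_taxid in parent_map:
--         current_rank = rank_map.get(current_taxid, '')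
--         current_name = taxid_to_name.get(current_taxid, '')
--
--         # 映射到目标分类等级
--         if current_rank == 'superkingdom':
--             target_ranks['kingdom'] = current_name
--         elif current_rank in target_ranks:
--             target_ranks[current_rank] = current_name
--
--         current_taxid = parent_map[current_taxid]
--
--     return [
--         target_ranks['kingdom'],
--         target_ranks['phylum'],
--         target_ranks['class'],
--         target_ranks['order'],
--         target_ranks['family'],
--         target_ranks['genus']
--     ]
-- ===== SOURCE B (Python) =====
-- def get_taxonomic_ranks(taxid, parent_map, rank_map, taxid_to_name):
--     """获取物种的六级分类信息 — two-pass: record the lineage path, then answer each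
--     rank slot by scanning the path from the root end for the nearest-to-root match."""
--     path = []
--     t = taxid
--     while t != '1' and t in parent_map:
--         path.append(t)
--         t = parent_map[t]
--
--     def last_name(pred):
--         for x in reversed(path):
--             if pred(rank_map.get(x, '')):
--                 return taxid_to_name.get(x, '')
--         return ''
--
--     return [
--         last_name(lambda r: r == 'superkingdom' or r == 'kingdom'),
--         last_name(lambda r: r == 'phylum'),
--         last_name(lambda r: r == 'class'),
--         last_name(lambda r: r == 'order'),
--         last_name(lambda r: r == 'family'),
--         last_name(lambda r: r == 'genus'),
--     ]
-- ===== Notes on version B (the rewrite author's own statement) =====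
-- stated objective: alternative
-- what changed: A walks the lineage once mutating a six-slot dict with last-write-wins; B first records the visited path, then fills each of the six slots independently by a reverse scan of the path for the nearest-to-root node of that rank (kingdom slot matching superkingdom or kingdom).
import Mathlib
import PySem

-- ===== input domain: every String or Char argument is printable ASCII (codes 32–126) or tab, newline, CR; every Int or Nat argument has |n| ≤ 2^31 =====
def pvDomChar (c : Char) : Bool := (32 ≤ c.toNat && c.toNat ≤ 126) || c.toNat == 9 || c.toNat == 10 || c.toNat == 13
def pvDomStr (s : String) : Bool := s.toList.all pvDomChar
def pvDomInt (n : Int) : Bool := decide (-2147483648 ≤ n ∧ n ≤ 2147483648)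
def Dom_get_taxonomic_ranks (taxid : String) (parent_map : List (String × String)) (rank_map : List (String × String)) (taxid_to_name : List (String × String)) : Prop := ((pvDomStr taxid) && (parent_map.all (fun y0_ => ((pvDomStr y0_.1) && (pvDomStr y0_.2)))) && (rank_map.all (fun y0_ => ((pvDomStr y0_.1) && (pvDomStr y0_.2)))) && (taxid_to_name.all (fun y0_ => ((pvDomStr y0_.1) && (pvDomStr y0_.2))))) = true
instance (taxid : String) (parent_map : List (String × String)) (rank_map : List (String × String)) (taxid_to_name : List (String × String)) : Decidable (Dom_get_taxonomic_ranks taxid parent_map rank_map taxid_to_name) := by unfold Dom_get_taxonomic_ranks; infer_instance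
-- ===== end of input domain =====

-- B replaces A's single walk mutating a six-slot dict by a recorded path plus six
-- independent reverse scans (alternative decomposition, same cost); return values
-- are proved equal on all inputs where A terminates (Pre_).

-- ===== PORT A =====
-- the six-key result dict A initialises (literal transliteration of target_ranks)
def pvTargetRanks0 : PySem.Dict String String :=
  PySem.Dict.ofList [("kingdom", ""), ("phylum", ""), ("class", ""), ("order", ""), ("family", ""), ("genus", "")]

-- one iteration of A's while-body on the dict (rank/name lookups and the overwrite)
def pvStepA (rm tn : PySem.Dict String String) (d : PySem.Dict String String) (t : String) : PySem.Dict String String :=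
  let r := rm.getD t ""
  let n := tn.getD t ""
  if r == "superkingdom" then d.insert "kingdom" n
  else if d.contains r then d.insert r n
  else d

-- A's while-loop; fuel = |parent_map| + 1 suffices on every input admitted by Pre_
def pvLoopA (pm rm tn : PySem.Dict String String) : Nat → String → PySem.Dict String String → PySem.Dict String String
  | 0, _, d => d
  | fuel + 1, t, d =>
    if t ≠ "1" then
      match pm.get? t with
      | some p => pvLoopA pm rm tn fuel p (pvStepA rm tn d t)
      | none => d
    else d

def get_taxonomic_ranks (taxid : String) (parent_map : List (String × String)) (rank_map : List (String × String)) (taxid_to_name : List (String × String)) : List String :=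
  let pm := PySem.Dict.ofList parent_map
  let rm := PySem.Dict.ofList rank_map
  let tn := PySem.Dict.ofList taxid_to_name
  let d := pvLoopA pm rm tn (parent_map.length + 1) taxid pvTargetRanks0
  [d.getD "kingdom" "", d.getD "phylum" "", d.getD "class" "", d.getD "order" "", d.getD "family" "", d.getD "genus" ""]

-- ===== PORT B =====
-- first pass: the list of visited taxids (same guard and fuel as A's loop)
def pvWalkB (pm : PySem.Dict String String) : Nat → String → List String
  | 0, _ => []
  | fuel + 1, t =>
    if t ≠ "1" then
      match pm.get? t with
      | some p => t :: pvWalkB pm fuel p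
      | none => []
    else []

-- second pass: nearest-to-root node of the path whose rank satisfies pred
def pvLastName (rm tn : PySem.Dict String String) (path : List String) (pred : String → Bool) : String :=
  match path.reverse.find? (fun x => pred (rm.getD x "")) with
  | some x => tn.getD x ""
  | none => ""

def get_taxonomic_ranks_alt (taxid : String) (parent_map : List (String × String)) (rank_map : List (String × String)) (taxid_to_name : List (String × String)) : List String :=
  let pm := PySem.Dict.ofList parent_map
  let rm := PySem.Dict.ofList rank_map
  let tn := PySem.Dict.ofList taxid_to_name
  let path := pvWalkB pm (parent_map.length + 1) taxid
  [ pvLastName rm tn path (fun r => r == "superkingdom" || r == "kingdom"),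
    pvLastName rm tn path (fun r => r == "phylum"),
    pvLastName rm tn path (fun r => r == "class"),
    pvLastName rm tn path (fun r => r == "order"),
    pvLastName rm tn path (fun r => r == "family"),
    pvLastName rm tn path (fun r => r == "genus") ]

-- ===== PRECONDITION & SPEC =====
-- Pre_ excludes exactly the inputs on which Python A never returns: lineages whose
-- parent chain from taxid cycles instead of reaching '1' or leaving parent_map
-- (a terminating walk visits distinct keys, hence halts within |parent_map| steps).
def Pre_get_taxonomic_ranks (taxid : String) (parent_map : List (String × String)) (rank_map : List (String × String)) (taxid_to_name : List (String × String)) : Prop :=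
  ((List.range (parent_map.length + 1)).any (fun n =>
    let t := (fun u => (PySem.Dict.ofList parent_map).getD u u)^[n] taxid
    t == "1" || !((PySem.Dict.ofList parent_map).contains t))) = true
instance (taxid : String) (parent_map : List (String × String)) (rank_map : List (String × String)) (taxid_to_name : List (String × String)) : Decidable (Pre_get_taxonomic_ranks taxid parent_map rank_map taxid_to_name) := by unfold Pre_get_taxonomic_ranks; infer_instance

def pvWitness_get_taxonomic_ranks : String × (List (String × String)) × (List (String × String)) × (List (String × String)) :=
  ("9", [("9", "4"), ("4", "2"), ("2", "1")], [("9", "genus"), ("4", "phylum"), ("2", "superkingdom")], [("9", "Homo"), ("4", "Chordata"), ("2", "Eukaryota")])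

def Spec_get_taxonomic_ranks (taxid : String) (parent_map : List (String × String)) (rank_map : List (String × String)) (taxid_to_name : List (String × String)) (out : List String) : Prop := out = get_taxonomic_ranks_alt taxid parent_map rank_map taxid_to_name
instance (taxid : String) (parent_map : List (String × String)) (rank_map : List (String × String)) (taxid_to_name : List (String × String)) (out : List String) : Decidable (Spec_get_taxonomic_ranks taxid parent_map rank_map taxid_to_name out) := by unfold Spec_get_taxonomic_ranks; infer_instance

-- ===== CLAIM (what is proved, stated in full; the proofs are below) =====
def Claim_equal_get_taxonomic_ranks : Prop := ∀ (taxid : String) (parent_map : List (String × String)) (rank_map : List (String × String)) (taxid_to_name : List (String × String)), Dom_get_taxonomic_ranks taxid parent_map rank_map taxid_to_name → Pre_get_taxonomic_ranks taxid parent_map rank_map taxid_to_name → Spec_get_taxonomic_ranks taxid parent_map rank_map taxid_to_name (get_taxonomic_ranks taxid parent_map rank_map taxid_to_name)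

-- ===== LEMMAS AND PROOFS =====
-- the six slot keys of A's dict
def pvKEYS : List String := ["kingdom", "phylum", "class", "order", "family", "genus"]

-- which ranks write into slot s (kingdom receives both superkingdom and kingdom)
def pvPredFor (s : String) (r : String) : Bool :=
  if s = "kingdom" then r == "superkingdom" || r == "kingdom" else r == s

lemma pvKeys_stepA (rm tn : PySem.Dict String String) (d : PySem.Dict String String) (t : String)
    (hk : d.keys = pvKEYS) : (pvStepA rm tn d t).keys = pvKEYS := by
  unfold pvStepA
  simp only []
  split_ifs with h1 h2
  · rw [PySem.Dict.keys_insert_of_contains d _ (by rw [PySem.Dict.contains_eq_decide_mem_keys, hk]; decide), hk]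
  · rw [PySem.Dict.keys_insert_of_contains d _ h2, hk]
  · exact hk

lemma pvGetD_stepA (rm tn : PySem.Dict String String) (d : PySem.Dict String String) (t : String)
    (s : String) (hs : s ∈ pvKEYS) (hk : d.keys = pvKEYS) :
    (pvStepA rm tn d t).getD s "" =
      if pvPredFor s (rm.getD t "") then tn.getD t "" else d.getD s "" := by
  unfold pvStepA pvPredFor
  have hcont : ∀ x : String, d.contains x = decide (x ∈ pvKEYS) := by
    intro x; rw [PySem.Dict.contains_eq_decide_mem_keys, hk]
  generalize rm.getD t "" = r
  generalize tn.getD t "" = n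
  fin_cases hs <;>
  · simp only []
    by_cases h1 : r = "superkingdom"
    · subst h1; simp [PySem.Dict.getD_insert]
    · by_cases h2 : r ∈ pvKEYS
      · rw [if_neg (by simpa using h1), if_pos (by rw [hcont]; simpa using h2),
            PySem.Dict.getD_insert]
        fin_cases h2 <;> simp_all
      · rw [if_neg (by simpa using h1), if_neg (by rw [hcont]; simpa using h2)]
        have : r ≠ "kingdom" ∧ r ≠ "phylum" ∧ r ≠ "class" ∧ r ≠ "order" ∧ r ≠ "family" ∧ r ≠ "genus" := by
          simp [pvKEYS] at h2; tauto
        obtain ⟨k1, k2, k3, k4, k5, k6⟩ := this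
        simp_all

-- A's loop is the fold of pvStepA over B's recorded path
lemma pvLoopA_eq_foldl (pm rm tn : PySem.Dict String String) :
    ∀ (fuel : Nat) (t : String) (d : PySem.Dict String String),
      pvLoopA pm rm tn fuel t d = (pvWalkB pm fuel t).foldl (pvStepA rm tn) d := by
  intro fuel
  induction fuel with
  | zero => intro t d; rfl
  | succ n ih =>
    intro t d
    unfold pvLoopA pvWalkB
    by_cases h : t ≠ "1"
    · rw [if_pos h, if_pos h]
      cases pm.get? t with
      | none => rfl
      | some p => simp [List.foldl, ih]
    · rw [if_neg h, if_neg h]; rfl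

-- reading one slot of the folded dict = reverse-scan of the path
lemma pvFoldl_getD (rm tn : PySem.Dict String String) (s : String) (hs : s ∈ pvKEYS) :
    ∀ (path : List String) (d : PySem.Dict String String), d.keys = pvKEYS →
      (path.foldl (pvStepA rm tn) d).getD s "" =
        match path.reverse.find? (fun x => pvPredFor s (rm.getD x "")) with
        | some x => tn.getD x ""
        | none => d.getD s "" := by
  intro path
  induction path with
  | nil => intro d _; rfl
  | cons x xs ih =>
    intro d hk
    have hk' : (pvStepA rm tn d x).keys = pvKEYS := pvKeys_stepA rm tn d x hk
    simp only [List.foldl, List.reverse_cons, List.find?_append]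
    rw [ih (pvStepA rm tn d x) hk']
    cases hfind : xs.reverse.find? (fun y => pvPredFor s (rm.getD y "")) with
    | some y => simp
    | none =>
      simp only [Option.none_or, List.find?]
      rw [pvGetD_stepA rm tn d x s hs hk]
      by_cases hp : pvPredFor s (rm.getD x "") = true
      · simp [hp]
      · simp at hp; simp [hp]

lemma pvKeys_d0 : pvTargetRanks0.keys = pvKEYS := by decide

lemma pvLastName_eq (rm tn : PySem.Dict String String) (path : List String)
    (pred : String → Bool) (s : String)
    (hp : ∀ r, pred r = pvPredFor s r) :
    pvLastName rm tn path pred =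
      match path.reverse.find? (fun x => pvPredFor s (rm.getD x "")) with
      | some x => tn.getD x ""
      | none => "" := by
  unfold pvLastName
  have : (fun x => pred (rm.getD x "")) = (fun x => pvPredFor s (rm.getD x "")) := by
    funext x; rw [hp]
  rw [this]

-- ===== VERDICT (by name: the statement is the Claim_ definition above) =====
theorem get_taxonomic_ranks_spec : Claim_equal_get_taxonomic_ranks := by
  unfold Claim_equal_get_taxonomic_ranks
  intro taxid parent_map rank_map taxid_to_name _ _
  unfold Spec_get_taxonomic_ranks get_taxonomic_ranks get_taxonomic_ranks_alt
  simp only []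
  set pm := PySem.Dict.ofList parent_map
  set rm := PySem.Dict.ofList rank_map
  set tn := PySem.Dict.ofList taxid_to_name
  set path := pvWalkB pm (parent_map.length + 1) taxid with hpath
  rw [pvLoopA_eq_foldl]
  rw [← hpath]
  have slot : ∀ (s : String), s ∈ pvKEYS → ∀ (pred : String → Bool), (∀ r, pred r = pvPredFor s r) →
      (path.foldl (pvStepA rm tn) pvTargetRanks0).getD s "" = pvLastName rm tn path pred := by
    intro s hs pred hp
    rw [pvFoldl_getD rm tn s hs path pvTargetRanks0 pvKeys_d0, pvLastName_eq rm tn path pred s hp]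
    cases path.reverse.find? (fun x => pvPredFor s (rm.getD x "")) with
    | some y => rfl
    | none => have : pvTargetRanks0.getD s "" = "" := by fin_cases hs <;> decide
              simp [this]
  congr 1
  · exact slot "kingdom" (by decide) _ (fun r => by simp [pvPredFor])
  congr 1
  · exact slot "phylum" (by decide) _ (fun r => by simp [pvPredFor])
  congr 1
  · exact slot "class" (by decide) _ (fun r => by simp [pvPredFor])
  congr 1
  · exact slot "order" (by decide) _ (fun r => by simp [pvPredFor])
  congr 1
  · exact slot "family" (by decide) _ (fun r => by simp [pvPredFor])
  congr 1
  · exact slot "genus" (by decide) _ (fun r => by simp [pvPredFor])
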